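-- pv_equiv track=rewrite | github.com/eternalseptember/Hacker-Rank | searching/connected_cells_grid.py | is_connected_to_list
-- ===== SOURCE A (Python) =====
-- def is_connected_to_list(list_of_cells, cell):
-- 	found = False
--
-- 	for connected_cell in list_of_cells:
-- 		connected = is_connected(connected_cell, cell)
--
-- 		if connected:
-- 			found = True
-- 			break
--
-- 	return found
--
-- def is_connected(unknown_cell, cell):
-- 	(c_x, c_y) = unknown_cell
-- 	(x, y) = cell
--
-- 	if (c_x == (x - 1)):
-- 		if (c_y == (y - 1)) or (c_y == y) or (c_y == (y + 1)):
-- 			return True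
-- 		else:
-- 			return False
-- 	elif (c_x == x):
-- 		if (c_y == (y - 1)) or (c_y == (y + 1)):
-- 			return True
-- 		else:
-- 			return False
-- 	elif (c_x == (x + 1)):
-- 		if (c_y == (y - 1)) or (c_y == y) or (c_y == (y + 1)):
-- 			return True
-- 		else:
-- 			return False
-- 	else:
-- 		return False
-- ===== SOURCE B (Python) =====
-- def is_connected_to_list(list_of_cells, cell):
-- 	(x, y) = cell
-- 	cells = set(list_of_cells)
-- 	for dx in (-1, 0, 1):
-- 		for dy in (-1, 0, 1):
-- 			if (dx or dy) and (x + dx, y + dy) in cells: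
-- 				return True
-- 	return False
-- ===== Notes on version B (the rewrite author's own statement) =====
-- stated objective: alternative
-- what changed: Inverts the traversal: instead of scanning the list and testing each element's 8-adjacency with a branch cascade, B indexes the whole list into a hash set once and probes only the eight neighbor coordinates of cell for membership.
import Mathlib
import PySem

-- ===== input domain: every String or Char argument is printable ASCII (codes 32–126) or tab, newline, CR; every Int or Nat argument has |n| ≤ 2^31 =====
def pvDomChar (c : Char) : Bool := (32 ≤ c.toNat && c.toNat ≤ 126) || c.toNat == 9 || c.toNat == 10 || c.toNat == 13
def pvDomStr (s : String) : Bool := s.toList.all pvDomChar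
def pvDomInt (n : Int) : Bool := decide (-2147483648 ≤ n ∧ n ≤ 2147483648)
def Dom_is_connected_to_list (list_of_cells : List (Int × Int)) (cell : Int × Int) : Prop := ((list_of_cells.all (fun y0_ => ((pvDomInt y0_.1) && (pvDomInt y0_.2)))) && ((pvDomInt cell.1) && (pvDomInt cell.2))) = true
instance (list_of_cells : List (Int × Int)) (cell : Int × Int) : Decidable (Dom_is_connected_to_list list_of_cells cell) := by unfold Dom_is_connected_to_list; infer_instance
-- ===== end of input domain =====

-- B inverts the traversal: it indexes the cells into a set once and probes the eight
-- neighbor coordinates of `cell` for membership (objective: alternative algorithm).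

-- ===== PORT A =====
def is_connected (unknown_cell : Int × Int) (cell : Int × Int) : Bool :=
  let c_x := unknown_cell.1
  let c_y := unknown_cell.2
  let x := cell.1
  let y := cell.2
  if c_x == x - 1 then
    if (c_y == y - 1) || (c_y == y) || (c_y == y + 1) then true else false
  else if c_x == x then
    if (c_y == y - 1) || (c_y == y + 1) then true else false
  else if c_x == x + 1 then
    if (c_y == y - 1) || (c_y == y) || (c_y == y + 1) then true else false
  else
    false

-- the for-loop with `found`/`break`: recurse over the list, stopping at the first connected cell
def is_connected_to_list_loop (cell : Int × Int) : List (Int × Int) → Bool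
  | [] => false
  | connected_cell :: rest =>
      if is_connected connected_cell cell then true
      else is_connected_to_list_loop cell rest

def is_connected_to_list (list_of_cells : List (Int × Int)) (cell : Int × Int) : Bool :=
  is_connected_to_list_loop cell list_of_cells

-- ===== PORT B =====
-- inner 'for dy in (-1, 0, 1)' loop; `(dx or dy)` is Python truthiness: dx ≠ 0 or dy ≠ 0
def pv_alt_inner (cells : PySem.Set (Int × Int)) (x y dx : Int) : List Int → Bool
  | [] => false
  | dy :: rest =>
      if (dx != 0 || dy != 0) && PySem.Set.contains cells (x + dx, y + dy) then true
      else pv_alt_inner cells x y dx rest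

-- outer 'for dx in (-1, 0, 1)' loop
def pv_alt_outer (cells : PySem.Set (Int × Int)) (x y : Int) : List Int → Bool
  | [] => false
  | dx :: rest =>
      if pv_alt_inner cells x y dx [-1, 0, 1] then true
      else pv_alt_outer cells x y rest

def is_connected_to_list_alt (list_of_cells : List (Int × Int)) (cell : Int × Int) : Bool :=
  let x := cell.1
  let y := cell.2
  let cells := PySem.Set.ofList list_of_cells
  pv_alt_outer cells x y [-1, 0, 1]

-- ===== PRECONDITION & SPEC =====
def Spec_is_connected_to_list (list_of_cells : List (Int × Int)) (cell : Int × Int) (out : Bool) : Prop := out = is_connected_to_list_alt list_of_cells cell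
instance (list_of_cells : List (Int × Int)) (cell : Int × Int) (out : Bool) : Decidable (Spec_is_connected_to_list list_of_cells cell out) := by unfold Spec_is_connected_to_list; infer_instance

-- ===== CLAIM (what is proved, stated in full; the proofs are below) =====
def Claim_equal_is_connected_to_list : Prop := ∀ (list_of_cells : List (Int × Int)) (cell : Int × Int), Dom_is_connected_to_list list_of_cells cell → Spec_is_connected_to_list list_of_cells cell (is_connected_to_list list_of_cells cell)

-- ===== LEMMAS AND PROOFS =====

-- A's loop returns true exactly when some element is 8-adjacent
theorem loopA_true_iff (cell : Int × Int) (l : List (Int × Int)) :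
    is_connected_to_list_loop cell l = true ↔ ∃ c ∈ l, is_connected c cell = true := by
  induction l with
  | nil => simp [is_connected_to_list_loop]
  | cons c rest ih =>
      by_cases h : is_connected c cell = true <;>
        simp [is_connected_to_list_loop, h, ih]

-- per-cell: A's branch cascade decides exactly "c is one of the eight neighbors"
theorem is_connected_iff (cx cy x y : Int) :
    is_connected (cx, cy) (x, y) = true ↔
      (cx = x - 1 ∨ cx = x ∨ cx = x + 1) ∧ (cy = y - 1 ∨ cy = y ∨ cy = y + 1) ∧
        ¬(cx = x ∧ cy = y) := by
  simp only [is_connected]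
  split_ifs <;> simp_all <;> omega

-- B's inner loop returns true exactly when some offset column hits the set
theorem inner_true_iff (cells : PySem.Set (Int × Int)) (x y dx : Int) (dys : List Int) :
    pv_alt_inner cells x y dx dys = true ↔
      ∃ dy ∈ dys, ¬(dx = 0 ∧ dy = 0) ∧ (x + dx, y + dy) ∈ cells := by
  induction dys with
  | nil => simp [pv_alt_inner]
  | cons dy rest ih =>
      by_cases h : ((dx != 0 || dy != 0) && PySem.Set.contains cells (x + dx, y + dy)) = true
      · simp only [pv_alt_inner, if_pos h]
        simp only [Bool.and_eq_true, Bool.or_eq_true, bne_iff_ne,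
          PySem.Set.contains_iff] at h
        exact iff_of_true trivial ⟨dy, List.mem_cons_self, by tauto, h.2⟩
      · simp only [pv_alt_inner, if_neg h, ih]
        simp only [Bool.and_eq_true, Bool.or_eq_true, bne_iff_ne,
          PySem.Set.contains_iff, not_and_or] at h
        constructor
        · rintro ⟨d, hd, hp⟩; exact ⟨d, List.mem_cons_of_mem _ hd, hp⟩
        · rintro ⟨d, hd, hne, hm⟩
          rcases List.mem_cons.mp hd with rfl | hd'
          · tauto
          · exact ⟨d, hd', hne, hm⟩

-- B's outer loop: true iff some row's inner loop hits
theorem outer_true_iff (cells : PySem.Set (Int × Int)) (x y : Int) (dxs : List Int) :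
    pv_alt_outer cells x y dxs = true ↔
      ∃ dx ∈ dxs, pv_alt_inner cells x y dx [-1, 0, 1] = true := by
  induction dxs with
  | nil => simp [pv_alt_outer]
  | cons dx rest ih =>
      by_cases h : pv_alt_inner cells x y dx [-1, 0, 1] = true <;>
        simp [pv_alt_outer, h, ih]

-- B returns true exactly when one of the eight neighbor coordinates is in the list
theorem altB_true_iff (l : List (Int × Int)) (x y : Int) :
    is_connected_to_list_alt l (x, y) = true ↔
      ∃ dx ∈ ([-1, 0, 1] : List Int), ∃ dy ∈ ([-1, 0, 1] : List Int),
        ¬(dx = 0 ∧ dy = 0) ∧ (x + dx, y + dy) ∈ l := by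
  simp only [is_connected_to_list_alt, outer_true_iff, inner_true_iff,
    PySem.Set.mem_ofList]

-- ===== VERDICT (by name: the statement is the Claim_ definition above) =====
theorem is_connected_to_list_spec : Claim_equal_is_connected_to_list := by
  intro l cell _
  obtain ⟨x, y⟩ := cell
  unfold Spec_is_connected_to_list is_connected_to_list
  rw [Bool.eq_iff_iff, loopA_true_iff, altB_true_iff]
  constructor
  · rintro ⟨⟨cx, cy⟩, hmem, hc⟩
    rw [is_connected_iff] at hc
    exact ⟨cx - x, by simp; omega, cy - y, by simp; omega, by omega, by
      simpa [show x + (cx - x) = cx by ring, show y + (cy - y) = cy by ring] using hmem⟩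
  · rintro ⟨dx, hdx, dy, hdy, hne, hmem⟩
    refine ⟨(x + dx, y + dy), hmem, ?_⟩
    rw [is_connected_iff]
    simp at hdx hdy
    omega
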